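-- pv_equiv track=rewrite | github.com/breeze-byj/chinadrugtrials.org.cn | utils/encapsulation.py | str_del_index
-- ===== SOURCE A (Python) =====
-- def str_del_index(str, index):
--     '''
--     Args: 根据下标删除字符
--         str:进行操作的字符串
--         index:要删除的位置
--     Returns:
--         _str:删除完成后的字符串
--     '''
--     _str = ''
--     if index < 0:
--         str = str[::-1]
--         index = 0 - index - 1
--         for i in range(len(str)):
--             if i == index:
--                 continue
--             _str += str[i]
--         _str = _str[::-1]
--     else:
--         for i in range(len(str)):
--             if i == index:
--                 continue
--             _str += str[i]
--     return _str
-- ===== SOURCE B (Python) =====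
-- def str_del_index(str, index):
--     '''Delete the character at (possibly negative) index; unchanged if out of range.'''
--     pos = index if index >= 0 else len(str) + index
--     if 0 <= pos < len(str):
--         return str[:pos] + str[pos + 1:]
--     return str
-- ===== Notes on version B (the rewrite author's own statement) =====
-- stated objective: idiomatic
-- what changed: Replaced the char-by-char rebuild loop and the reverse-the-string trick for negative indices by index normalisation (pos = index or len+index) plus a single slice concatenation.
import Mathlib
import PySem

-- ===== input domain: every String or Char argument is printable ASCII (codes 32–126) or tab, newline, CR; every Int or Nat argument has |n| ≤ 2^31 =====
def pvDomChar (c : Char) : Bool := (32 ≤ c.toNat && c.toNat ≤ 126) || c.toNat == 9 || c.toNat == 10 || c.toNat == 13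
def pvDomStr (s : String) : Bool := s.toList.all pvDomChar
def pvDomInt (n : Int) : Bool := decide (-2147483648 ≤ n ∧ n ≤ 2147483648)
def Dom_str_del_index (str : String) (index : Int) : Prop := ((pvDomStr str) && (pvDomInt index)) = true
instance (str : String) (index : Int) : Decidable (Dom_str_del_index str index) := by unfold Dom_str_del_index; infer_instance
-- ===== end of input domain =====

-- B replaces A's char-by-char rebuild loop (and the string-reversal trick for negative
-- indices) by index normalisation plus a single slice concatenation (idiomatic).


-- ===== PORT A =====
def str_del_index (str : String) (index : Int) : String :=
  if index < 0 then
    -- str = str[::-1]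
    let s := String.ofList str.toList.reverse
    -- index = 0 - index - 1
    let idx := 0 - index - 1
    -- for i in range(len(str)): if i == index: continue; _str += str[i]
    let body := (PySem.List.pyRange 0 (PySem.Str.len s) 1).foldl
      (fun acc i => if i = idx then acc else acc ++ [PySem.List.pyGetD s.toList i ' ']) []
    -- _str = _str[::-1]
    String.ofList body.reverse
  else
    let body := (PySem.List.pyRange 0 (PySem.Str.len str) 1).foldl
      (fun acc i => if i = index then acc else acc ++ [PySem.List.pyGetD str.toList i ' ']) []
    String.ofList body

-- ===== PORT B =====
def str_del_index_alt (str : String) (index : Int) : String :=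
  let n := PySem.Str.len str
  let pos := if 0 ≤ index then index else n + index
  if 0 ≤ pos ∧ pos < n then
    -- str[:pos] + str[pos+1:]
    String.ofList (PySem.List.slice str.toList none (some pos) ++
                   PySem.List.slice str.toList (some (pos + 1)) none)
  else str

-- ===== PRECONDITION & SPEC =====
def Spec_str_del_index (str : String) (index : Int) (out : String) : Prop := out = str_del_index_alt str index
instance (str : String) (index : Int) (out : String) : Decidable (Spec_str_del_index str index out) := by unfold Spec_str_del_index; infer_instance

-- ===== CLAIM (what is proved, stated in full; the proofs are below) =====
def Claim_equal_str_del_index : Prop := ∀ (str : String) (index : Int), Dom_str_del_index str index → Spec_str_del_index str index (str_del_index str index)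

-- ===== LEMMAS AND PROOFS =====

-- A's loop over range(len(l)) skipping position k builds: l with position k erased when
-- k is in range, and l itself otherwise.
theorem pv_loop_eq (l : List Char) (k : Int) :
    ((PySem.List.pyRange 0 (l.length : Int) 1).foldl
      (fun acc i => if i = k then acc else acc ++ [PySem.List.pyGetD l i ' ']) []) =
    if 0 ≤ k ∧ k < (l.length : Int) then l.take k.toNat ++ l.drop (k.toNat + 1) else l := by
  have hstep : (fun (acc : List Char) (i : Int) =>
      if i = k then acc else acc ++ [PySem.List.pyGetD l i ' '])
      = (fun acc i => if (decide ¬(i = k)) = true then acc ++ [PySem.List.pyGetD l i ' '] else acc) := by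
    funext acc i
    by_cases h : i = k <;> simp [h]
  rw [hstep, PySem.List.foldl_append_if (fun i => decide ¬(i = k))
    (fun i => PySem.List.pyGetD l i ' ')]
  simp only [List.nil_append]
  split_ifs with h
  · obtain ⟨hk0, hkn⟩ := h
    have hsplit := PySem.List.pyRange_one_append 0 k (l.length : Int) hk0 (le_of_lt hkn)
    have hcons := PySem.List.pyRange_one_cons (a := k) (b := (l.length : Int)) hkn
    have hfpre : List.filter (fun i => decide ¬(i = k)) (PySem.List.pyRange 0 k 1)
        = PySem.List.pyRange 0 k 1 :=
      List.filter_eq_self.mpr (fun a ha => by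
        have := (PySem.List.mem_pyRange_one).mp ha
        simp only [decide_eq_true_iff]; omega)
    have hfsuf : List.filter (fun i => decide ¬(i = k)) (PySem.List.pyRange (k + 1) (l.length : Int) 1)
        = PySem.List.pyRange (k + 1) (l.length : Int) 1 :=
      List.filter_eq_self.mpr (fun a ha => by
        have := (PySem.List.mem_pyRange_one).mp ha
        simp only [decide_eq_true_iff]; omega)
    have hfilt : List.filter (fun i => decide ¬(i = k)) (PySem.List.pyRange 0 (l.length : Int) 1)
        = PySem.List.pyRange 0 k 1 ++ PySem.List.pyRange (k + 1) (l.length : Int) 1 := by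
      rw [hsplit, hcons, List.filter_append, List.filter_cons, hfpre, hfsuf]
      simp
    rw [hfilt, List.map_append]
    have hsuf : List.map (fun i => PySem.List.pyGetD l i ' ')
        (PySem.List.pyRange (k + 1) (l.length : Int) 1) = l.drop (k + 1).toNat :=
      PySem.List.map_pyGetD_pyRange' l ' ' (by omega)
    have hpre : List.map (fun i => PySem.List.pyGetD l i ' ')
        (PySem.List.pyRange 0 k 1) = l.take k.toNat := by
      have hall := PySem.List.map_pyGetD_pyRange_zero' l ' '
      have hmid : List.map (fun i => PySem.List.pyGetD l i ' ')
          (PySem.List.pyRange k (l.length : Int) 1) = l.drop k.toNat :=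
        PySem.List.map_pyGetD_pyRange' l ' ' hk0
      rw [hsplit, List.map_append, hmid] at hall
      have hlen : (List.map (fun i => PySem.List.pyGetD l i ' ')
          (PySem.List.pyRange 0 k 1)).length = k.toNat := by
        rw [List.length_map, PySem.List.length_pyRange_one]; omega
      calc List.map (fun i => PySem.List.pyGetD l i ' ') (PySem.List.pyRange 0 k 1)
          = List.take k.toNat (List.map (fun i => PySem.List.pyGetD l i ' ')
              (PySem.List.pyRange 0 k 1) ++ l.drop k.toNat) := (List.take_left' hlen).symm
        _ = List.take k.toNat l := by rw [hall]
    rw [hpre, hsuf]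
    have : (k + 1).toNat = k.toNat + 1 := by omega
    rw [this]
  · have hfilt : List.filter (fun i => decide ¬(i = k)) (PySem.List.pyRange 0 (l.length : Int) 1)
        = PySem.List.pyRange 0 (l.length : Int) 1 :=
      List.filter_eq_self.mpr (fun a ha => by
        have := (PySem.List.mem_pyRange_one).mp ha
        simp only [decide_eq_true_iff]; omega)
    rw [hfilt, PySem.List.map_pyGetD_pyRange_zero']

-- ===== VERDICT (by name: the statement is the Claim_ definition above) =====
theorem str_del_index_spec : Claim_equal_str_del_index := by
  intro str index _
  unfold Spec_str_del_index str_del_index str_del_index_alt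
  by_cases hneg : index < 0
  · have hnotpos : ¬ 0 ≤ index := by omega
    simp only [if_pos hneg, if_neg hnotpos, PySem.Str.len_eq, String.toList_ofList]
    rw [pv_loop_eq str.toList.reverse (0 - index - 1)]
    by_cases hin : 0 ≤ (str.toList.length : Int) + index
    · have hc1 : 0 ≤ 0 - index - 1 ∧ 0 - index - 1 < ((str.toList.reverse).length : Int) := by
        rw [List.length_reverse]; omega
      have hc2 : 0 ≤ (str.toList.length : Int) + index ∧
          (str.toList.length : Int) + index < (str.toList.length : Int) := by omega
      rw [if_pos hc1, if_pos hc2]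
      rw [PySem.List.slice_to _ (by omega), PySem.List.slice_from _ (by omega)]
      rw [List.reverse_append, List.take_reverse, List.drop_reverse,
        List.reverse_reverse, List.reverse_reverse]
      have e1 : str.toList.length - ((0 - index - 1).toNat + 1)
          = ((str.toList.length : Int) + index).toNat := by omega
      have e2 : str.toList.length - (0 - index - 1).toNat
          = ((str.toList.length : Int) + index + 1).toNat := by omega
      rw [e1, e2]
    · have hc1 : ¬ (0 ≤ 0 - index - 1 ∧ 0 - index - 1 < ((str.toList.reverse).length : Int)) := by
        rw [List.length_reverse]; omega
      have hc2 : ¬ (0 ≤ (str.toList.length : Int) + index ∧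
          (str.toList.length : Int) + index < (str.toList.length : Int)) := by omega
      rw [if_neg hc1, if_neg hc2, List.reverse_reverse, String.ofList_toList]
  · have hpos : 0 ≤ index := by omega
    simp only [if_neg hneg, if_pos hpos, PySem.Str.len_eq]
    rw [pv_loop_eq str.toList index]
    by_cases hin : 0 ≤ index ∧ index < (str.toList.length : Int)
    · rw [if_pos hin, if_pos hin]
      rw [PySem.List.slice_to _ (by omega), PySem.List.slice_from _ (by omega)]
      have e : (index + 1).toNat = index.toNat + 1 := by omega
      rw [e]
    · rw [if_neg hin, if_neg hin, String.ofList_toList]
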